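-- pv_equiv track=rewrite | github.com/chenxu0602/LeetCode | 2245.maximum-trailing-zeros-in-a-cornered-path.py | maxTrailingZeros
-- ===== SOURCE A (Python) =====
-- from typing import List
--
-- def maxTrailingZeros(grid: List[List[int]]) -> int:
--     m, n = map(len, (grid, grid[0]))
--     left = [[(0, 0) for _ in range(n)] for _ in range(m)]
--     top = [[(0, 0) for _ in range(n)] for _ in range(m)]
--
--     def helper(num):
--         a, b = 0, 0
--         while num % 2 == 0:
--             num //= 2
--             a += 1
--
--         while num % 5 == 0:
--             num //= 5
--             b += 1
--
--         return (a, b)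
--
--     for i in range(m):
--         for j in range(n):
--             if j == 0:
--                 left[i][j] = helper(grid[i][j])
--             else:
--                 a, b = helper(grid[i][j])
--                 left[i][j] = (left[i][j - 1][0] + a, left[i][j - 1][1] + b)
--
--     for j in range(n):
--         for i in range(m):
--             if i == 0:
--                 top[i][j] = helper(grid[i][j])
--             else:
--                 a, b = helper(grid[i][j])
--                 top[i][j] = (top[i - 1][j][0] + a, top[i - 1][j][1] + b)
--
--     ans = 0
--     for i in range(m):
--         for j in range(n):
--             a, b = top[m - 1][j]
--             d, e = left[i][n - 1]
--
--             x, y = helper(grid[i][j])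
--             a1, b1 = top[i][j]
--             a2, b2 = left[i][j]
--
--             tmp = [a1 + a2 - x, b1 + b2 - y]
--             ans = max(ans, min(tmp))
--
--             tmp = [d - a2 + a1, e - b2 + b1]
--             ans = max(ans, min(tmp))
--
--             tmp = [a - a1 + a2, b - b1 + b2]
--             ans = max(ans, min(tmp))
--
--             tmp = [a + d - a1 - a2 + x, b + e - b1 - b2 + y]
--             ans = max(ans, min(tmp))
--
--     return ans
-- ===== SOURCE B (Python) =====
-- def maxTrailingZeros(grid):
--     m, n = len(grid), len(grid[0])
--
--     def factors(v):
--         a = b = 0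
--         while v % 2 == 0:
--             v //= 2
--             a += 1
--         while v % 5 == 0:
--             v //= 5
--             b += 1
--         return (a, b)
--
--     def arm(cells):
--         a = b = 0
--         for v in cells:
--             x, y = factors(v)
--             a += x
--             b += y
--         return (a, b)
--
--     best = 0
--     for i in range(m):
--         for j in range(n):
--             x, y = factors(grid[i][j])
--             up = arm(grid[k][j] for k in range(i + 1))
--             down = arm(grid[k][j] for k in range(i, m))
--             left = arm(grid[i][:j + 1])
--             right = arm(grid[i][j:n])
--             for (va, vb), (ha, hb) in ((up, left), (up, right), (down, left), (down, right)):
--                 best = max(best, min(va + ha - x, vb + hb - y))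
--     return best
-- ===== Notes on version B (the rewrite author's own statement) =====
-- stated objective: alternative
-- what changed: B drops A's precomputed left/top prefix-sum tables entirely: for every corner cell it recomputes the (2s,5s) factor sums of the four arms by walking the row slice / column directly, trading A's O(mn) table machinery for a direct O(mn(m+n)) brute-force summation.
import Mathlib
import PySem

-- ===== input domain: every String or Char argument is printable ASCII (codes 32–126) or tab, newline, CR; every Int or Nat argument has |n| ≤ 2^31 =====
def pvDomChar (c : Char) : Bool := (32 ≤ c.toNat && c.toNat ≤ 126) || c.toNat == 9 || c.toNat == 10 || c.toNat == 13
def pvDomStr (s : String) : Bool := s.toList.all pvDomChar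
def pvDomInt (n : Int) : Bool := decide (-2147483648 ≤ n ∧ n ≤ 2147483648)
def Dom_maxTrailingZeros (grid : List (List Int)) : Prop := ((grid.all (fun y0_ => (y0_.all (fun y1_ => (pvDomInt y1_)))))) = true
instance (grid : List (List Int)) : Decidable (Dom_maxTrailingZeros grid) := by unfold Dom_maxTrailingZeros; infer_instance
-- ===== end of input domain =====

-- B drops A's precomputed left/top prefix-sum tables: it recomputes each arm's factor sums by walking the
-- row slice / column directly per corner cell (brute force, not faster — 'alternative').

-- shared helper: Python's `helper`/`factors` (identical code in Source A and Source B).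
-- fuel = |num| bounds the number of strip steps; Python diverges on num = 0, which Pre_ excludes.
def pvStrip (p : Int) : Nat → Int → Int × Int
  | 0, num => (0, num)
  | fuel + 1, num =>
    if PySem.Int.mod num p = 0 then
      let r := pvStrip p fuel (PySem.Int.floordiv num p)
      (r.1 + 1, r.2)
    else (0, num)

def pvHelper (num : Int) : Int × Int :=
  let r2 := pvStrip 2 num.natAbs num
  let r5 := pvStrip 5 r2.2.natAbs r2.2
  ((r2.1 : Int), (r5.1 : Int))

-- ===== PORT A =====
-- A's row/column fill loops: running (2s,5s) prefix, factorizing each cell as it goes.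
def pvScanRow (a b : Int) : List Int → List (Int × Int)
  | [] => []
  | v :: t =>
    let h := pvHelper v
    (a + h.1, b + h.2) :: pvScanRow (a + h.1) (b + h.2) t

def pvLeftA (grid : List (List Int)) : List (List (Int × Int)) :=
  grid.map (pvScanRow 0 0)

-- A's `top` table, stored column-wise (the j-outer loop fills it one column at a time)
def pvTopA (grid : List (List Int)) (n : Nat) : List (List (Int × Int)) :=
  (List.range n).map (fun j => pvScanRow 0 0 (grid.map (fun row => row.getD j 0)))

-- body of A's final double loop
def pvCellA (grid : List (List Int)) (left top : List (List (Int × Int)))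
    (m n i j : Nat) (ans : Int) : Int :=
  let ab := (top.getD j []).getD (m - 1) ((0 : Int), (0 : Int))
  let de := (left.getD i []).getD (n - 1) ((0 : Int), (0 : Int))
  let xy := pvHelper ((grid.getD i []).getD j 0)
  let t1 := (top.getD j []).getD i ((0 : Int), (0 : Int))
  let l1 := (left.getD i []).getD j ((0 : Int), (0 : Int))
  let ans := max ans (min (t1.1 + l1.1 - xy.1) (t1.2 + l1.2 - xy.2))
  let ans := max ans (min (de.1 - l1.1 + t1.1) (de.2 - l1.2 + t1.2))
  let ans := max ans (min (ab.1 - t1.1 + l1.1) (ab.2 - t1.2 + l1.2))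
  max ans (min (ab.1 + de.1 - t1.1 - l1.1 + xy.1) (ab.2 + de.2 - t1.2 - l1.2 + xy.2))

def maxTrailingZeros (grid : List (List Int)) : Int :=
  let m := grid.length
  let n := (grid.headD []).length
  let left := pvLeftA grid
  let top := pvTopA grid n
  (List.range m).foldl (fun ans i =>
    (List.range n).foldl (fun ans j => pvCellA grid left top m n i j ans) ans) 0

-- ===== PORT B =====
-- B's `arm`: fold the factor sums of a cell sequence with a running (a,b) accumulator
def pvArm (cells : List Int) : Int × Int :=
  cells.foldl (fun ab v => let h := pvHelper v; (ab.1 + h.1, ab.2 + h.2)) (0, 0)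

-- body of B's double loop: recompute the four arms by direct walks
def pvCellB (grid : List (List Int)) (m n i j : Nat) (ans : Int) : Int :=
  let xy := pvHelper ((grid.getD i []).getD j 0)
  let up := pvArm ((List.range (i + 1)).map (fun k => (grid.getD k []).getD j 0))
  let down := pvArm ((List.range' i (m - i)).map (fun k => (grid.getD k []).getD j 0))
  let left := pvArm ((grid.getD i []).take (j + 1))
  let right := pvArm (((grid.getD i []).take n).drop j)
  [(up, left), (up, right), (down, left), (down, right)].foldl
    (fun ans p => max ans (min (p.1.1 + p.2.1 - xy.1) (p.1.2 + p.2.2 - xy.2))) ans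

def maxTrailingZeros_alt (grid : List (List Int)) : Int :=
  let m := grid.length
  let n := (grid.headD []).length
  (List.range m).foldl (fun ans i =>
    (List.range n).foldl (fun ans j => pvCellB grid m n i j ans) ans) 0

-- ===== PRECONDITION & SPEC =====
-- Pre_ = exactly where the Python A returns: a nonempty grid (A indexes grid[0]), every row at least as long as the
-- first (A indexes row[j] for j < len(grid[0])), and no zero among the first len(grid[0]) entries of any row
-- (helper(0) loops forever).
def Pre_maxTrailingZeros (grid : List (List Int)) : Prop :=
  grid ≠ [] ∧ ∀ row ∈ grid, (grid.headD []).length ≤ row.length ∧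
    ∀ x ∈ row.take (grid.headD []).length, x ≠ 0

instance (grid : List (List Int)) : Decidable (Pre_maxTrailingZeros grid) := by
  unfold Pre_maxTrailingZeros; infer_instance

def pvWitness_maxTrailingZeros : List (List Int) := [[4, 25], [10, 3]]

def Spec_maxTrailingZeros (grid : List (List Int)) (out : Int) : Prop := out = maxTrailingZeros_alt grid
instance (grid : List (List Int)) (out : Int) : Decidable (Spec_maxTrailingZeros grid out) := by unfold Spec_maxTrailingZeros; infer_instance

-- ===== CLAIM (what is proved, stated in full; the proofs are below) =====
def Claim_equal_maxTrailingZeros : Prop := ∀ (grid : List (List Int)), Dom_maxTrailingZeros grid → Pre_maxTrailingZeros grid → Spec_maxTrailingZeros grid (maxTrailingZeros grid)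

-- ===== LEMMAS AND PROOFS =====

-- componentwise sums of a factor list
def sf (l : List (Int × Int)) : Int := (l.map Prod.fst).sum
def ss (l : List (Int × Int)) : Int := (l.map Prod.snd).sum

theorem pvScanRow_length (l : List Int) : ∀ a b, (pvScanRow a b l).length = l.length := by
  induction l with
  | nil => intro a b; rfl
  | cons v t ih => intro a b; simp [pvScanRow, ih]

theorem pvScanRow_getElem (l : List Int) : ∀ a b (j : Nat) (hj : j < l.length),
    (pvScanRow a b l)[j]'(by rw [pvScanRow_length]; exact hj) =
      (a + sf ((l.map pvHelper).take (j + 1)), b + ss ((l.map pvHelper).take (j + 1))) := by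
  induction l with
  | nil => intro a b j hj; simp at hj
  | cons v t ih =>
    intro a b j hj
    cases j with
    | zero => simp [pvScanRow, sf, ss]
    | succ j =>
      have hj' : j < t.length := by simpa using hj
      have := ih (a + (pvHelper v).1) (b + (pvHelper v).2) j hj'
      simp only [pvScanRow, List.getElem_cons_succ]
      rw [this]
      simp [sf, ss]
      constructor <;> ring

theorem pvScanRow_getD (l : List Int) (j : Nat) (hj : j < l.length) :
    (pvScanRow 0 0 l).getD j ((0 : Int), (0 : Int)) =
      (sf ((l.map pvHelper).take (j + 1)), ss ((l.map pvHelper).take (j + 1))) := by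
  rw [List.getD_eq_getElem _ _ (by rw [pvScanRow_length]; exact hj), pvScanRow_getElem l 0 0 j hj]
  simp

theorem pvArm_foldl (l : List Int) : ∀ a b,
    l.foldl (fun ab v => let h := pvHelper v; (ab.1 + h.1, ab.2 + h.2)) (a, b) =
      (a + sf (l.map pvHelper), b + ss (l.map pvHelper)) := by
  induction l with
  | nil => intro a b; simp [sf, ss]
  | cons v t ih =>
    intro a b
    simp only [List.foldl_cons, ih]
    simp [sf, ss]
    constructor <;> ring

theorem pvArm_eq (l : List Int) : pvArm l = (sf (l.map pvHelper), ss (l.map pvHelper)) := by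
  simpa using pvArm_foldl l 0 0

theorem getD_map_range {α : Type} (g : Nat → α) (n j : Nat) (d : α) (hj : j < n) :
    ((List.range n).map g).getD j d = g j := by
  rw [List.getD_eq_getElem _ _ (by simpa using hj)]
  simp

theorem getD_map {α β : Type} (g : α → β) (l : List α) (i : Nat) (d : β) (hi : i < l.length) :
    (l.map g).getD i d = g (l[i]'hi) := by
  rw [List.getD_eq_getElem _ _ (by simpa using hi)]
  simp

theorem sf_take_succ (l : List (Int × Int)) (j : Nat) (hj : j < l.length) :
    sf (l.take (j + 1)) = sf (l.take j) + (l[j]'hj).1 := by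
  simp only [sf, List.map_take]
  rw [List.sum_take_succ _ j (by simpa using hj)]
  simp

theorem ss_take_succ (l : List (Int × Int)) (j : Nat) (hj : j < l.length) :
    ss (l.take (j + 1)) = ss (l.take j) + (l[j]'hj).2 := by
  simp only [ss, List.map_take]
  rw [List.sum_take_succ _ j (by simpa using hj)]
  simp

theorem sf_drop (l : List (Int × Int)) (j : Nat) :
    sf (l.drop j) = sf l - sf (l.take j) := by
  have := List.take_append_drop j l
  have h2 : sf l = sf (l.take j) + sf (l.drop j) := by
    conv_lhs => rw [← this]
    simp [sf]
  omega

theorem ss_drop (l : List (Int × Int)) (j : Nat) :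
    ss (l.drop j) = ss l - ss (l.take j) := by
  have := List.take_append_drop j l
  have h2 : ss l = ss (l.take j) + ss (l.drop j) := by
    conv_lhs => rw [← this]
    simp [ss]
  omega

set_option maxHeartbeats 1000000 in
theorem cell_eq (grid : List (List Int))
    (hn : ∀ row ∈ grid, (grid.headD []).length ≤ row.length)
    (i j : Nat) (hi : i < grid.length) (hj : j < (grid.headD []).length) (ans : Int) :
    pvCellA grid (pvLeftA grid) (pvTopA grid (grid.headD []).length)
      grid.length (grid.headD []).length i j ans
    = pvCellB grid grid.length (grid.headD []).length i j ans := by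
  set n := (grid.headD []).length with hn_def
  set row := grid[i]'hi with hrow_def
  have hgdi : grid.getD i [] = row := List.getD_eq_getElem _ _ hi
  have hrowlen : n ≤ row.length := hn row (List.getElem_mem hi)
  set hl := row.map pvHelper with hl_def
  have hhl_len : row.length = hl.length := by simp [hl_def]
  set hc := grid.map (fun r => pvHelper (r.getD j 0)) with hc_def
  have hhc_len : hc.length = grid.length := by simp [hc_def]
  have hjhl : j < hl.length := by omega
  have hihc : i < hc.length := by omega
  -- A-side table entries
  have hA_left : (pvLeftA grid).getD i [] = pvScanRow 0 0 row := by
    rw [pvLeftA, getD_map _ _ _ _ (by simpa using hi), ← hrow_def]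
  have hcol_map : (grid.map (fun r => r.getD j 0)).map pvHelper = hc := by
    rw [List.map_map, hc_def]; rfl
  have hA_top : (pvTopA grid n).getD j [] = pvScanRow 0 0 (grid.map (fun r => r.getD j 0)) := by
    rw [pvTopA, getD_map_range _ _ _ _ hj]
  have e_l1 : (pvScanRow 0 0 row).getD j ((0 : Int), (0 : Int)) =
      (sf (hl.take (j + 1)), ss (hl.take (j + 1))) := by
    rw [pvScanRow_getD row j (by omega), ← hl_def]
  have e_de : (pvScanRow 0 0 row).getD (n - 1) ((0 : Int), (0 : Int)) =
      (sf (hl.take n), ss (hl.take n)) := by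
    rw [pvScanRow_getD row (n - 1) (by omega), ← hl_def, show n - 1 + 1 = n by omega]
  have e_t1 : (pvScanRow 0 0 (grid.map (fun r => r.getD j 0))).getD i ((0 : Int), (0 : Int)) =
      (sf (hc.take (i + 1)), ss (hc.take (i + 1))) := by
    rw [pvScanRow_getD _ i (by simpa using hi), hcol_map]
  have e_ab : (pvScanRow 0 0 (grid.map (fun r => r.getD j 0))).getD (grid.length - 1)
      ((0 : Int), (0 : Int)) = (sf hc, ss hc) := by
    rw [pvScanRow_getD _ (grid.length - 1) (by simp; omega), hcol_map]
    have : hc.take (grid.length - 1 + 1) = hc := by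
      apply List.take_of_length_le; omega
    rw [this]
  -- B-side arms
  have e_up : ((List.range (i + 1)).map (fun k => (grid.getD k []).getD j 0)).map pvHelper =
      hc.take (i + 1) := by
    apply List.ext_getElem
    · simp [hhc_len]; omega
    · intro k h1 h2
      have hk : k < i + 1 := by simpa using h1
      have hkg : k < grid.length := by omega
      simp only [List.getElem_map, List.getElem_range, List.getElem_take, hc_def]
      rw [List.getD_eq_getElem _ _ hkg]
  have e_down : ((List.range' i (grid.length - i)).map (fun k => (grid.getD k []).getD j 0)).map
      pvHelper = hc.drop i := by
    apply List.ext_getElem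
    · simp [hhc_len]
    · intro k h1 h2
      have hk : k < grid.length - i := by simpa using h1
      have hkg : i + k < grid.length := by omega
      simp only [List.getElem_map, List.getElem_range', List.getElem_drop, hc_def, one_mul]
      rw [List.getD_eq_getElem _ _ hkg]
  have e_left : (((grid.getD i []).take (j + 1)).map pvHelper) = hl.take (j + 1) := by
    rw [hgdi, hl_def, List.map_take]
  have e_right : ((((grid.getD i []).take n).drop j).map pvHelper) = (hl.take n).drop j := by
    rw [hgdi, hl_def, List.map_drop, List.map_take]
  -- the cell value read both ways
  have e_xy : pvHelper ((grid.getD i []).getD j 0) = hl[j]'hjhl := by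
    rw [hgdi, List.getD_eq_getElem _ _ (by omega)]
    simp [hl_def]
  have e_hcx : hc[i]'hihc = hl[j]'hjhl := by
    simp only [hc_def, hl_def, List.getElem_map, ← hrow_def]
    rw [List.getD_eq_getElem _ _ (by omega)]
  -- prefix recurrences relating (·+1)-prefixes to plain prefixes plus the cell
  have r1 : sf (hl.take (j + 1)) = sf (hl.take j) + (hl[j]'hjhl).1 := sf_take_succ hl j hjhl
  have r2 : ss (hl.take (j + 1)) = ss (hl.take j) + (hl[j]'hjhl).2 := ss_take_succ hl j hjhl
  have r3 : sf (hc.take (i + 1)) = sf (hc.take i) + (hl[j]'hjhl).1 := by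
    rw [sf_take_succ hc i hihc, e_hcx]
  have r4 : ss (hc.take (i + 1)) = ss (hc.take i) + (hl[j]'hjhl).2 := by
    rw [ss_take_succ hc i hihc, e_hcx]
  have d1 : sf ((hl.take n).drop j) = sf (hl.take n) - sf (hl.take j) := by
    rw [sf_drop, List.take_take, show min j n = j by omega]
  have d2 : ss ((hl.take n).drop j) = ss (hl.take n) - ss (hl.take j) := by
    rw [ss_drop, List.take_take, show min j n = j by omega]
  have d3 : sf (hc.drop i) = sf hc - sf (hc.take i) := sf_drop hc i
  have d4 : ss (hc.drop i) = ss hc - ss (hc.take i) := ss_drop hc i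
  unfold pvCellA pvCellB
  simp only [List.foldl_cons, List.foldl_nil, pvArm_eq, e_up, e_down, e_left, e_right]
  rw [hA_left, hA_top, e_l1, e_de, e_t1, e_ab, e_xy]
  rw [r1, r2, r3, r4, d1, d2, d3, d4]
  refine congrArg₂ max (congrArg₂ max (congrArg₂ max (congrArg₂ max rfl ?_) ?_) ?_) ?_ <;>
    exact congrArg₂ min (by ring) (by ring)

-- ===== VERDICT (by name: the statement is the Claim_ definition above) =====
theorem maxTrailingZeros_spec : Claim_equal_maxTrailingZeros := by
  intro grid _ hpre
  unfold Spec_maxTrailingZeros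
  obtain ⟨hne, hrows⟩ := hpre
  have hn : ∀ row ∈ grid, (grid.headD []).length ≤ row.length := fun r hr => (hrows r hr).1
  simp only [maxTrailingZeros, maxTrailingZeros_alt]
  apply PySem.List.foldl_congr_mem
  intro acc i hi
  apply PySem.List.foldl_congr_mem
  intro acc' j hj
  exact cell_eq grid hn i j (List.mem_range.mp hi) (List.mem_range.mp hj) acc'
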